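-- pv_equiv track=rewrite | github.com/Miner3D-Gamer/TGE | manipulation/dictionary_utils.py | remove_duplicates_from_dictionary
-- ===== SOURCE A (Python) =====
-- def remove_duplicates_from_dictionary(dictionary):
--     """
--     Remove duplicates from a dictionary based on its values.
--
--     Parameters:
--     dictionary (dict): A dictionary to remove duplicates from based on values.
--
--     Returns:
--     dict: A new dictionary with unique values, where only the first occurrence
--           of each value is retained, preserving the original key-value pairs.
--     """
--     unique_values = set(dictionary.values())
--     new_dictionary = {}
--
--     for key, value in dictionary.items():
--         if value in unique_values:
--             new_dictionary[key] = value
--             unique_values.remove(value)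
--
--     return new_dictionary
-- ===== SOURCE B (Python) =====
-- def remove_duplicates_from_dictionary(dictionary):
--     items = list(dictionary.items())
--     return {k: v
--             for i, (k, v) in enumerate(items)
--             if v not in [w for _, w in items[:i]]}
-- ===== Notes on version B (the rewrite author's own statement) =====
-- stated objective: alternative
-- what changed: A makes a single pass filtering items against a pre-built, shrinking set of values; B keeps no auxiliary set at all and instead keeps an item iff its value does not occur among the values of the items strictly before it (a quadratic scan-back over the prefix), trading the set machinery for a positional duplicate test. Pre_ excludes association lists with duplicate keys, which do not encode any Python dict input.
import Mathlib
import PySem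

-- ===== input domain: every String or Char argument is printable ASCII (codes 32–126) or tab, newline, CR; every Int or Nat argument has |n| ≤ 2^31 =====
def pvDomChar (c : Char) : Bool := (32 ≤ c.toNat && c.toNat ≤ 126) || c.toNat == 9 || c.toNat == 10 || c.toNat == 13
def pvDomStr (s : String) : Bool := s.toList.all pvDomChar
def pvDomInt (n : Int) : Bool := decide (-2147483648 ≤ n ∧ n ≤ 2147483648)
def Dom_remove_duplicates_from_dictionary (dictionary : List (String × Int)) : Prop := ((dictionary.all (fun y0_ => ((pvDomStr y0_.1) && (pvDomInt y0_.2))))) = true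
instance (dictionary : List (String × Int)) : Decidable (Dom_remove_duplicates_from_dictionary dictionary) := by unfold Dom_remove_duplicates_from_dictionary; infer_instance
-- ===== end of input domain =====

-- B drops A's pre-built shrinking value-set entirely: it keeps an item iff its value does not occur
-- among the values of the items strictly before it (quadratic prefix scan); objective: alternative.

-- ===== PORT A =====
-- the 'for key, value in dictionary.items()' loop of A, state = (unique_values, new_dictionary)
def pvALoop (S : PySem.Set Int) (nd : PySem.Dict String Int) :
    List (String × Int) → PySem.Dict String Int
  | [] => nd
  | (k, v) :: t =>
    if PySem.Set.contains S v then
      pvALoop (PySem.Set.discard S v) (nd.insert k v) t   -- value kept, then unique_values.remove(value)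
    else
      pvALoop S nd t

def remove_duplicates_from_dictionary (dictionary : List (String × Int)) : List (String × Int) :=
  let unique_values : PySem.Set Int := PySem.Set.ofList (dictionary.map (·.2))
  (pvALoop unique_values PySem.Dict.empty dictionary).items

-- ===== PORT B =====
-- B's comprehension over enumerate(items): prev is items[:i] (the already-scanned prefix);
-- the test 'v not in [w for _, w in items[:i]]' is membership of v in prev's values
def pvBLoop (prev : List (String × Int)) (d : PySem.Dict String Int) :
    List (String × Int) → PySem.Dict String Int
  | [] => d
  | (k, v) :: t =>
    if v ∈ prev.map (·.2) then pvBLoop (prev ++ [(k, v)]) d t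
    else pvBLoop (prev ++ [(k, v)]) (d.insert k v) t

def remove_duplicates_from_dictionary_alt (dictionary : List (String × Int)) : List (String × Int) :=
  (pvBLoop [] PySem.Dict.empty dictionary).items

-- ===== PRECONDITION & SPEC =====
-- Pre_ excludes lists with duplicate keys: the Python argument is a dict, so its items list always
-- has distinct keys — a duplicate-key list does not encode any Python input of this function.
def Pre_remove_duplicates_from_dictionary (dictionary : List (String × Int)) : Prop :=
  (dictionary.map (·.1)).Nodup
instance (dictionary : List (String × Int)) : Decidable (Pre_remove_duplicates_from_dictionary dictionary) := by
  unfold Pre_remove_duplicates_from_dictionary; infer_instance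

def pvWitness_remove_duplicates_from_dictionary : (List (String × Int)) :=
  [("a", 1), ("b", 2), ("c", 1)]

def Spec_remove_duplicates_from_dictionary (dictionary : List (String × Int)) (out : List (String × Int)) : Prop := out = remove_duplicates_from_dictionary_alt dictionary
instance (dictionary : List (String × Int)) (out : List (String × Int)) : Decidable (Spec_remove_duplicates_from_dictionary dictionary out) := by unfold Spec_remove_duplicates_from_dictionary; infer_instance

-- ===== CLAIM (what is proved, stated in full; the proofs are below) =====
def Claim_equal_remove_duplicates_from_dictionary : Prop := ∀ (dictionary : List (String × Int)), Dom_remove_duplicates_from_dictionary dictionary → Pre_remove_duplicates_from_dictionary dictionary → Spec_remove_duplicates_from_dictionary dictionary (remove_duplicates_from_dictionary dictionary)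

-- ===== LEMMAS AND PROOFS =====

-- reference "first key per value" function both loops are shown to compute
def pvKeep (seen : List Int) : List (String × Int) → List (String × Int)
  | [] => []
  | (k, v) :: t => if v ∈ seen then pvKeep seen t else (k, v) :: pvKeep (v :: seen) t

lemma pvALoop_items (l : List (String × Int)) (S : PySem.Set Int)
    (nd : PySem.Dict String Int) (seen : List Int)
    (hS : ∀ v ∈ l.map (·.2), (PySem.Set.contains S v = true ↔ v ∉ seen))
    (hk : ∀ k ∈ l.map (·.1), nd.contains k = false)
    (hnd : (l.map (·.1)).Nodup) :
    (pvALoop S nd l).items = nd.items ++ pvKeep seen l := by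
  induction l generalizing S nd seen with
  | nil => simp [pvALoop, pvKeep]
  | cons p t ih =>
    obtain ⟨k, v⟩ := p
    simp only [List.map_cons, List.nodup_cons, List.mem_cons] at hS hk hnd
    simp only [pvALoop, pvKeep]
    by_cases hv : v ∈ seen
    · rw [if_neg (by simpa [hv] using (hS v (Or.inl rfl))), if_pos hv]
      exact ih S nd seen (fun w hw => hS w (Or.inr hw)) (fun k' hk' => hk k' (Or.inr hk')) hnd.2
    · rw [if_pos ((hS v (Or.inl rfl)).mpr hv), if_neg hv]
      rw [ih (PySem.Set.discard S v) (nd.insert k v) (v :: seen) ?_ ?_ hnd.2]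
      · rw [PySem.Dict.items_insert_of_not_contains _ _ (hk k (Or.inl rfl))]
        simp
      · intro w hw
        rw [PySem.Set.contains_iff, PySem.Set.mem_discard]
        constructor
        · rintro ⟨hwS, hne⟩ hmem
          rcases List.mem_cons.mp hmem with h1 | h2
          · exact hne h1
          · exact ((hS w (Or.inr hw)).mp (by rw [PySem.Set.contains_iff] at *; exact hwS)) h2
        · intro hnot
          refine ⟨?_, fun he => hnot (he ▸ List.mem_cons_self ..)⟩
          rw [← PySem.Set.contains_iff]
          exact (hS w (Or.inr hw)).mpr (fun hm => hnot (List.mem_cons_of_mem _ hm))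
      · intro k' hk'
        rw [PySem.Dict.contains_insert]
        have hne : k' ≠ k := fun he => hnd.1 (he ▸ hk')
        simp [hne, hk k' (Or.inr hk')]

lemma pvBLoop_items (l : List (String × Int)) (prev : List (String × Int))
    (d : PySem.Dict String Int) (seen : List Int)
    (hs : ∀ x, x ∈ seen ↔ x ∈ prev.map (·.2))
    (hk : ∀ k ∈ l.map (·.1), d.contains k = false)
    (hnd : (l.map (·.1)).Nodup) :
    (pvBLoop prev d l).items = d.items ++ pvKeep seen l := by
  induction l generalizing prev d seen with
  | nil => simp [pvBLoop, pvKeep]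
  | cons p t ih =>
    obtain ⟨k, v⟩ := p
    simp only [List.map_cons, List.nodup_cons, List.mem_cons] at hk hnd
    simp only [pvBLoop, pvKeep]
    have hs' : ∀ x, x ∈ (v :: seen) ↔ x ∈ (prev ++ [(k, v)]).map (·.2) := by
      intro x; simp [List.mem_cons, hs x, or_comm]
    by_cases hv : v ∈ seen
    · rw [if_pos ((hs v).mp hv), if_pos hv]
      refine ih _ _ seen (fun x => (hs x).trans ?_) (fun k' hk' => hk k' (Or.inr hk')) hnd.2
      constructor
      · intro h; simp [h]
      · intro h
        rcases (by simpa using h : x ∈ prev.map (·.2) ∨ x = v) with h1 | h1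
        · exact h1
        · exact h1 ▸ (hs v).mp hv
    · rw [if_neg (fun h => hv ((hs v).mpr h)), if_neg hv]
      rw [ih (prev ++ [(k, v)]) (d.insert k v) (v :: seen) hs' ?_ hnd.2]
      · rw [PySem.Dict.items_insert_of_not_contains _ _ (hk k (Or.inl rfl))]
        simp
      · intro k' hk'
        rw [PySem.Dict.contains_insert]
        have hne : k' ≠ k := fun he => hnd.1 (he ▸ hk')
        simp [hne, hk k' (Or.inr hk')]

-- ===== VERDICT (by name: the statement is the Claim_ definition above) =====
theorem remove_duplicates_from_dictionary_spec : Claim_equal_remove_duplicates_from_dictionary := by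
  intro dictionary _ hpre
  unfold Spec_remove_duplicates_from_dictionary
  unfold remove_duplicates_from_dictionary remove_duplicates_from_dictionary_alt
  rw [pvALoop_items dictionary _ _ []
      (by intro v hv; simp [PySem.Set.mem_ofList, hv])
      (by intro k _; exact rfl) hpre,
    pvBLoop_items dictionary [] _ []
      (by intro x; simp)
      (by intro k _; exact rfl) hpre]
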